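-- pv_equiv track=rewrite | github.com/GulshanAnand/DSA | next_lexicographical_string.py | next_lexicographic_string
-- ===== SOURCE A (Python) =====
-- def next_lexicographic_string(s):
--     chars = list(s)
--     i = len(chars) - 1
--     while i >= 0 and chars[i] == 'z':
--         i -= 1
--     if i < 0:
--         a = "a"
--         for i in range(0, len(s)):
--             a += 'a'
--         return a
--     chars[i] = chr(ord(chars[i]) + 1)
--     chars[i+1:] = ['a'] * (len(chars) - i - 1)
--     return ''.join(chars)
-- ===== SOURCE B (Python) =====
-- def next_lexicographic_string(s):
--     if not s:
--         return "a"
--     if s[-1] != 'z':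
--         return s[:-1] + chr(ord(s[-1]) + 1)
--     return next_lexicographic_string(s[:-1]) + 'a'
-- ===== Notes on version B (the rewrite author's own statement) =====
-- stated objective: simpler
-- what changed: Replaces A's iterative index-hunting while loop plus in-place char-array mutation and slice assignment by a three-line self-recursive decomposition: empty string maps to the single lowest letter, a last character below the top letter is incremented, otherwise recurse on the prefix s[:-1] and append the lowest letter.
import Mathlib
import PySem

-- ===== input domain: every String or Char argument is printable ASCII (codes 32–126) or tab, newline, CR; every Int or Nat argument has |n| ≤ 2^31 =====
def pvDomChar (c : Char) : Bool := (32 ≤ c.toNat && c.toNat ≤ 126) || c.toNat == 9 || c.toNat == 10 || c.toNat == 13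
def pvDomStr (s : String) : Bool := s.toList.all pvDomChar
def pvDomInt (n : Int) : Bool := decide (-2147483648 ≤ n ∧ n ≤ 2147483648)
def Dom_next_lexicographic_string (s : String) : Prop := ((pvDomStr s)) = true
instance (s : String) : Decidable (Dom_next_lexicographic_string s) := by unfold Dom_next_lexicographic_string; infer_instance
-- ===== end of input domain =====

-- B replaces A's index-hunting while loop and slice assignment by a short
-- self-recursive decomposition on s[:-1] (objective: simpler).

-- ===== PORT A =====
-- the while loop 'while i >= 0 and chars[i] == 'z': i -= 1', started at i = n - 1
def pvA_loop (chars : List Char) : Nat → Int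
  | 0 => -1
  | n + 1 => if PySem.List.pyGet? chars (n : Int) = some 'z' then pvA_loop chars n else (n : Int)

def next_lexicographic_string (s : String) : String :=
  if pvA_loop s.toList s.toList.length < 0 then
    -- a = "a"; for i in range(0, len(s)): a += 'a'
    String.ofList (List.foldl (fun a _ => a ++ ['a']) ['a'] (PySem.List.pyRange 0 (s.toList.length : Int) 1))
  else
    -- chars[i] = chr(ord(chars[i]) + 1); chars[i+1:] = ['a'] * (len(chars) - i - 1)
    String.ofList (s.toList.take (pvA_loop s.toList s.toList.length).toNat
      ++ [Char.ofNat ((s.toList.getD (pvA_loop s.toList s.toList.length).toNat 'a').toNat + 1)]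
      ++ List.replicate (s.toList.length - (pvA_loop s.toList s.toList.length).toNat - 1) 'a')

-- ===== PORT B =====
-- B's recursion on s[:-1]; getLast? plays s[-1], dropLast plays s[:-1]
def pvB_rec (l : List Char) : List Char :=
  if h : l = [] then ['a']
  else if l.getLast h = 'z' then pvB_rec l.dropLast ++ ['a']
  else l.dropLast ++ [Char.ofNat ((l.getLast h).toNat + 1)]
termination_by l.length
decreasing_by simpa using Nat.sub_lt (List.length_pos_of_ne_nil h) Nat.one_pos

def next_lexicographic_string_alt (s : String) : String :=
  String.ofList (pvB_rec s.toList)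

-- ===== PRECONDITION & SPEC =====
def Spec_next_lexicographic_string (s : String) (out : String) : Prop := out = next_lexicographic_string_alt s
instance (s : String) (out : String) : Decidable (Spec_next_lexicographic_string s out) := by unfold Spec_next_lexicographic_string; infer_instance

-- ===== CLAIM (what is proved, stated in full; the proofs are below) =====
def Claim_equal_next_lexicographic_string : Prop := ∀ (s : String), Dom_next_lexicographic_string s → Spec_next_lexicographic_string s (next_lexicographic_string s)

-- ===== LEMMAS AND PROOFS =====

-- common normal form of both programs, phrased over r = l.reverse
def pvNF (r : List Char) : List Char :=
  match r.dropWhile (· == 'z') with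
  | [] => List.replicate (r.length + 1) 'a'
  | c :: rest => rest.reverse ++ [Char.ofNat (c.toNat + 1)] ++ List.replicate (r.takeWhile (· == 'z')).length 'a'

-- A's while loop computes: index of last non-'z' among the first n chars, or -1
theorem pvA_loop_eq (chars : List Char) (n : Nat) (hn : n ≤ chars.length) :
    pvA_loop chars n = (n : Int) - 1 - ((((chars.take n).reverse.takeWhile (· == 'z')).length : Int)) := by
  induction n with
  | zero => simp [pvA_loop]
  | succ m ih =>
    have hm : m < chars.length := by omega
    have htake : chars.take (m + 1) = chars.take m ++ [chars[m]] := by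
      rw [List.take_add_one]
      simp [List.getElem?_eq_getElem hm]
    rw [pvA_loop, PySem.List.pyGet?_ofNat chars m hm, htake]
    by_cases hz : chars[m] = 'z'
    · simp only [hz, if_pos]
      rw [ih (by omega)]
      simp
      ring
    · have hne : ¬ (some chars[m] = some 'z') := by simp [hz]
      rw [if_neg hne]
      have hrev : (List.take m chars ++ [chars[m]]).reverse = chars[m] :: (List.take m chars).reverse := by
        simp
      rw [hrev, List.takeWhile_cons_of_neg (by simp [hz])]
      simp

theorem foldl_append_a (L : List Int) (acc : List Char) :
    List.foldl (fun a _ => a ++ ['a']) acc L = acc ++ List.replicate L.length 'a' := by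
  induction L generalizing acc with
  | nil => simp
  | cons x xs ih =>
    rw [List.foldl_cons, ih, List.append_assoc]
    simp [List.replicate_succ]

theorem takeWhile_z_eq_replicate (r : List Char) :
    r.takeWhile (· == 'z') = List.replicate (r.takeWhile (· == 'z')).length 'z' := by
  apply List.eq_replicate_of_mem
  intro b hb
  have := List.mem_takeWhile_imp hb
  simpa using this

-- B's recursion computes the normal form
theorem pvB_rec_eq (r : List Char) : pvB_rec r.reverse = pvNF r := by
  induction r with
  | nil => simp [pvB_rec, pvNF, List.replicate]
  | cons c rest ih =>
    have hrev : (c :: rest).reverse = rest.reverse ++ [c] := by simp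
    have hne : rest.reverse ++ [c] ≠ [] := by simp
    rw [hrev, pvB_rec, dif_neg hne]
    simp only [List.getLast_concat, List.dropLast_concat]
    by_cases hz : c = 'z'
    · rw [if_pos hz, ih]
      unfold pvNF
      subst hz
      rw [List.dropWhile_cons_of_pos (by simp), List.takeWhile_cons_of_pos (by simp)]
      cases hdw : rest.dropWhile (· == 'z') with
      | nil =>
        simp [List.replicate_succ']
      | cons c' rest' =>
        simp [List.replicate_succ']
    · rw [if_neg hz]
      unfold pvNF
      rw [List.dropWhile_cons_of_neg (by simp [hz]), List.takeWhile_cons_of_neg (by simp [hz])]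
      simp

-- A computes the normal form
theorem pvA_eq_NF (l : List Char) :
    next_lexicographic_string (String.ofList l) = String.ofList (pvNF l.reverse) := by
  have htl : (String.ofList l).toList = l := by simp
  unfold next_lexicographic_string
  rw [htl]
  set r := l.reverse with hr
  set tz := (r.takeWhile (· == 'z')).length with htz
  have hloop : pvA_loop l l.length = (l.length : Int) - 1 - (tz : Int) := by
    rw [pvA_loop_eq l l.length le_rfl]
    simp [htz, hr]
  have hsplit : r.takeWhile (· == 'z') ++ r.dropWhile (· == 'z') = r :=
    List.takeWhile_append_dropWhile
  have hlen_split : tz + (r.dropWhile (· == 'z')).length = l.length := by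
    have h := congrArg List.length hsplit
    simp only [List.length_append] at h
    simpa [htz, hr] using h
  rw [hloop]
  cases hdw : r.dropWhile (· == 'z') with
  | nil =>
    have hall : tz = l.length := by rw [hdw] at hlen_split; simpa using hlen_split
    have hneg : (l.length : Int) - 1 - (tz : Int) < 0 := by omega
    rw [if_pos hneg, foldl_append_a, PySem.List.length_pyRange_one]
    have hlen0 : ((l.length : Int) - 0).toNat = l.length := by omega
    rw [hlen0]
    unfold pvNF
    rw [hdw]
    have : r.length = l.length := by simp [hr]
    rw [this]
    simp [List.replicate_succ]
  | cons c rest =>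
    have hlen : tz + (rest.length + 1) = l.length := by
      rw [hdw] at hlen_split; simpa using hlen_split
    have hpos : ¬ ((l.length : Int) - 1 - (tz : Int) < 0) := by omega
    rw [if_neg hpos]
    have hn : ((l.length : Int) - 1 - (tz : Int)).toNat = rest.length := by omega
    rw [hn]
    -- l = rest.reverse ++ [c] ++ replicate tz 'z'
    have hldec : l = rest.reverse ++ [c] ++ List.replicate tz 'z' := by
      have h1 : r = List.replicate tz 'z' ++ (c :: rest) := by
        rw [← hsplit, hdw]
        congr 1
        rw [takeWhile_z_eq_replicate r, ← htz]
      have h2 : l = r.reverse := by simp [hr]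
      rw [h2, h1]
      simp
    have htake : l.take rest.length = rest.reverse := by
      rw [hldec, List.append_assoc, List.take_append_of_le_length (by simp)]
      simp
    have hget : l.getD rest.length 'a' = c := by
      rw [hldec]
      have : (rest.reverse ++ ([c] ++ List.replicate tz 'z')).getD rest.length 'a'
           = ([c] ++ List.replicate tz 'z').getD (rest.length - rest.reverse.length) 'a' := by
        apply List.getD_append_right
        simp
      rw [List.append_assoc, this]
      simp
    rw [htake, hget]
    unfold pvNF
    rw [hdw]
    have hrep : l.length - rest.length - 1 = tz := by omega
    rw [hrep, ← htz]

theorem main_eq (s : String) :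
    next_lexicographic_string s = next_lexicographic_string_alt s := by
  have h1 : s = String.ofList s.toList := by simp
  calc next_lexicographic_string s
      = next_lexicographic_string (String.ofList s.toList) := by rw [← h1]
    _ = String.ofList (pvNF s.toList.reverse) := pvA_eq_NF s.toList
    _ = String.ofList (pvB_rec s.toList.reverse.reverse) := by rw [pvB_rec_eq]
    _ = next_lexicographic_string_alt s := by
        unfold next_lexicographic_string_alt
        rw [List.reverse_reverse]

-- ===== VERDICT (by name: the statement is the Claim_ definition above) =====
theorem next_lexicographic_string_spec : Claim_equal_next_lexicographic_string := by
  intro s _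
  unfold Spec_next_lexicographic_string
  exact main_eq s
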